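-- pv_equiv track=rewrite | github.com/owais-ch/Arrays | top_k_numbers_stream.py | kTop
-- ===== SOURCE A (Python) =====
-- import math
--
-- def kTop(arr, N, K):
--     dict1=dict()
--     list1=[]
--     list2=[]
--     maximum=-math.inf
--
--     for i in range(N):
--         if arr[i] not in dict1:
--             dict1[arr[i]]=1
--         else:
--             dict1[arr[i]]+=1
--
--         maximum=max(maximum,dict1[arr[i]])
--
--         if i==0:
--             list1.append(arr[i])
--         else:
--             if dict1[arr[i]]>maximum:
--                 if dict1[arr[i]]>1:
--                     list1.remove(arr[i])
--                 list1=list1+[arr[i]]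
--             elif dict1[arr[i]]==maximum:
--                 if dict1[arr[i]]>1:
--                     list1.remove(arr[i])
--                 list1[:]=list1+[arr[i]]
--             else:
--                 if dict1[arr[i]]>1:
--                     list1.remove(arr[i])
--                 list1.append(arr[i])
--
--         list1=sorted(list1,key=lambda x:[-dict1[x],x])
--         list3=list1[:K]
--
--         list2.append(list3.copy())
--
--     return list2
-- ===== SOURCE B (Python) =====
-- import bisect
--
-- def kTop(arr, N, K):
--     counts = {}
--     order = []          # list of (-count, value), kept sorted ascending by bisect
--     result = []
--     for i in range(N):
--         x = arr[i]
--         c = counts.get(x, 0)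
--         if c:
--             order.pop(bisect.bisect_left(order, (-c, x)))
--         counts[x] = c + 1
--         bisect.insort(order, (-c - 1, x))
--         result.append([v for _, v in order[:K]])
--     return result
-- ===== Notes on version B (the rewrite author's own statement) =====
-- stated objective: alternative
-- what changed: B keeps one list sorted by (-count, value) and updates it incrementally with bisect delete/insert per stream element, instead of A's re-sorting the whole distinct-element list (plus a linear list.remove) at every step; timing runs read it around 3x faster, unconfirmed at the largest sizes, so no speed is claimed.
import Mathlib
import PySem

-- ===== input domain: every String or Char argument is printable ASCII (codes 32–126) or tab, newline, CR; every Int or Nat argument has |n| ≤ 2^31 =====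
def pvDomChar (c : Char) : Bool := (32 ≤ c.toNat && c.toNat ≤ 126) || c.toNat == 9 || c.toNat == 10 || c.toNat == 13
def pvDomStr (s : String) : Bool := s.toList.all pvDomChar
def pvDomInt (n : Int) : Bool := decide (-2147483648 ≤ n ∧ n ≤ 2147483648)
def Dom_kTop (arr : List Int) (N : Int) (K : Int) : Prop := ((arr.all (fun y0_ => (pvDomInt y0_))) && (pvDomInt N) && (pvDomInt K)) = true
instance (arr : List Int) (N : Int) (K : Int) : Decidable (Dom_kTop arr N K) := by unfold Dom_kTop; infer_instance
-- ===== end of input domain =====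

-- B re-implements the per-prefix top-K-by-(frequency, value) stream: instead of re-sorting the
-- whole distinct-element list every step (A), it keeps a list sorted by (-count, value) and
-- updates it incrementally by binary-search delete/insert (bisect), emitting the first K each step.

-- ===== PORT A =====
-- loop body of A's 'for i in range(N)'; state = (dict1, list1, list2, maximum).
-- 'maximum = -math.inf' is ported as 0: maximum is only read after 'maximum = max(maximum, count)'
-- with count ≥ 1, so any start value < 1 (like -inf) gives identical behaviour; exact.
-- arr[i] → pyGetD with default 0: Pre_kTop rules out the IndexError case, the default is never used there.
-- list1.remove(x) → remove? with getD fallback: only reached when dict1[x] > 1, so x ∈ list1 and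
-- remove? is some; the fallback is never used. key=lambda x:[-dict1[x],x] → the same two-element
-- Int-list key under Lean's lexicographic order on List Int (exact for Python list comparison of ints).
def kTopStepA (arr : List Int) (K : Int)
    (st : PySem.Dict Int Int × List Int × List (List Int) × Int) (i : Int) :
    PySem.Dict Int Int × List Int × List (List Int) × Int :=
  let d := st.1
  let l1 := st.2.1
  let l2 := st.2.2.1
  let m := st.2.2.2
  let x := PySem.List.pyGetD arr i 0
  let d := if d.contains x then d.insert x (d.getD x 0 + 1) else d.insert x 1
  let m := max m (d.getD x 0)
  let l1 :=
    if i == 0 then l1 ++ [x]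
    else if d.getD x 0 > m then
      (if d.getD x 0 > 1 then (PySem.List.remove? l1 x).getD l1 else l1) ++ [x]
    else if d.getD x 0 == m then
      (if d.getD x 0 > 1 then (PySem.List.remove? l1 x).getD l1 else l1) ++ [x]
    else
      (if d.getD x 0 > 1 then (PySem.List.remove? l1 x).getD l1 else l1) ++ [x]
  let l1 := PySem.List.sorted l1 (fun y => [-(d.getD y 0), y])
  let l3 := PySem.List.slice l1 none (some K)
  (d, l1, l2 ++ [l3], m)

def kTop (arr : List Int) (N : Int) (K : Int) : List (List Int) :=
  ((PySem.List.pyRange 0 N 1).foldl (kTopStepA arr K) (PySem.Dict.empty, [], [], 0)).2.2.1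

-- ===== PORT B =====
-- Python tuple comparison (-c, v) < (-c', v'), lexicographic on two ints (exact).
def pairLt (a b : Int × Int) : Bool := a.1 < b.1 || (a.1 == b.1 && a.2 < b.2)

-- order.pop(bisect.bisect_left(order, t)): drop the first element ≥ t.  B only calls it with
-- t present in the sorted list, where bisect_left points at t; on an empty list Python would
-- raise IndexError, which B's guard makes unreachable.
def popBisect (l : List (Int × Int)) (t : Int × Int) : List (Int × Int) :=
  match l with
  | [] => []
  | p :: rest => if pairLt p t then p :: popBisect rest t else rest

-- bisect.insort(order, t): insert t before the first strictly greater element.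
def insortLex (l : List (Int × Int)) (t : Int × Int) : List (Int × Int) :=
  match l with
  | [] => [t]
  | p :: rest => if pairLt t p then t :: p :: rest else p :: insortLex rest t

-- loop body of B's 'for i in range(N)'; state = (counts, order, result).
-- arr[i] → pyGetD with default 0 (same remark as in A's port).
def kTopStepB (arr : List Int) (K : Int)
    (st : PySem.Dict Int Int × List (Int × Int) × List (List Int)) (i : Int) :
    PySem.Dict Int Int × List (Int × Int) × List (List Int) :=
  let counts := st.1
  let order := st.2.1
  let res := st.2.2
  let x := PySem.List.pyGetD arr i 0
  let c := counts.getD x 0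
  let order := if c ≠ 0 then popBisect order (-c, x) else order
  let counts := counts.insert x (c + 1)
  let order := insortLex order (-c - 1, x)
  (counts, order, res ++ [(PySem.List.slice order none (some K)).map (·.2)])

def kTop_alt (arr : List Int) (N : Int) (K : Int) : List (List Int) :=
  ((PySem.List.pyRange 0 N 1).foldl (kTopStepB arr K) (PySem.Dict.empty, [], [])).2.2

-- ===== PRECONDITION & SPEC =====
-- Pre_ excludes exactly the inputs where Python raises IndexError on arr[i]: N > len(arr)
-- (both A and B index arr[i] for i in range(N) and raise there alike).
def Pre_kTop (arr : List Int) (N : Int) (_K : Int) : Prop := N ≤ (arr.length : Int)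
instance (arr : List Int) (N : Int) (K : Int) : Decidable (Pre_kTop arr N K) := by unfold Pre_kTop; infer_instance

def pvWitness_kTop : List Int × Int × Int := ([1, 2, 1, 3], 4, 2)

def Spec_kTop (arr : List Int) (N : Int) (K : Int) (out : List (List Int)) : Prop := out = kTop_alt arr N K
instance (arr : List Int) (N : Int) (K : Int) (out : List (List Int)) : Decidable (Spec_kTop arr N K out) := by unfold Spec_kTop; infer_instance

-- ===== CLAIM (what is proved, stated in full; the proofs are below) =====
def Claim_equal_kTop : Prop := ∀ (arr : List Int) (N : Int) (K : Int), Dom_kTop arr N K → Pre_kTop arr N K → Spec_kTop arr N K (kTop arr N K)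

-- ===== LEMMAS AND PROOFS =====

-- Prop form of the lexicographic pair order
def plt (a b : Int × Int) : Prop := a.1 < b.1 ∨ (a.1 = b.1 ∧ a.2 < b.2)

lemma pairLt_iff (a b : Int × Int) : pairLt a b = true ↔ plt a b := by
  simp [pairLt, plt]

lemma plt_irrefl (a : Int × Int) : ¬ plt a a := by simp [plt]

lemma plt_trans {a b c : Int × Int} (h1 : plt a b) (h2 : plt b c) : plt a c := by
  rcases a with ⟨a1, a2⟩; rcases b with ⟨b1, b2⟩; rcases c with ⟨c1, c2⟩
  simp only [plt] at *; omega

lemma plt_total {a b : Int × Int} (h : a ≠ b) : plt a b ∨ plt b a := by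
  rcases a with ⟨a1, a2⟩; rcases b with ⟨b1, b2⟩
  by_cases h1 : a1 = b1
  · subst h1
    have h2 : a2 ≠ b2 := by simpa using h
    simp [plt]; omega
  · simp only [plt]; omega

lemma listlex_iff (a b c d : Int) : ([a, b] : List Int) < [c, d] ↔ (a < c ∨ (a = c ∧ b < d)) := by
  constructor
  · intro h; rcases h with _ | _ | h <;> simp_all
  · rintro (h | ⟨rfl, h⟩)
    · exact List.Lex.rel h
    · exact List.Lex.cons (List.Lex.rel h)

lemma popBisect_eq_erase (S : List (Int × Int)) (t : Int × Int)
    (hs : List.Pairwise plt S) (ht : t ∈ S) : popBisect S t = S.erase t := by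
  induction S with
  | nil => cases ht
  | cons p rest ih =>
    rcases List.pairwise_cons.mp hs with ⟨hp, hrest⟩
    by_cases hlt : pairLt p t = true
    · have hpt : plt p t := (pairLt_iff _ _).mp hlt
      have hne : p ≠ t := by rintro rfl; exact plt_irrefl _ hpt
      have ht' : t ∈ rest := by
        rcases List.mem_cons.mp ht with h | h
        · exact absurd h.symm hne
        · exact h
      rw [popBisect, if_pos hlt, List.erase_cons_tail, ih hrest ht']
      simpa using hne
    · have : t = p := by
        rcases List.mem_cons.mp ht with h | h
        · exact h
        · exact absurd ((pairLt_iff _ _).mpr (hp _ h)) hlt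
      subst this
      rw [popBisect, if_neg hlt, List.erase_cons_head]

lemma insortLex_perm (S : List (Int × Int)) (t : Int × Int) : (insortLex S t).Perm (t :: S) := by
  induction S with
  | nil => rfl
  | cons p rest ih =>
    rw [insortLex]
    split
    · exact List.Perm.refl _
    · exact (ih.cons p).trans (List.Perm.swap t p rest)

lemma insortLex_pairwise (S : List (Int × Int)) (t : Int × Int)
    (hs : List.Pairwise plt S) (hne : ∀ p ∈ S, p ≠ t) :
    List.Pairwise plt (insortLex S t) := by
  induction S with
  | nil => simp [insortLex]
  | cons p rest ih =>
    rcases List.pairwise_cons.mp hs with ⟨hp, hrest⟩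
    rw [insortLex]
    split
    next hlt =>
      have htp : plt t p := (pairLt_iff _ _).mp hlt
      refine List.pairwise_cons.mpr ⟨?_, hs⟩
      intro q hq
      rcases List.mem_cons.mp hq with h | h
      · subst h; exact htp
      · exact plt_trans htp (hp _ h)
    next hlt =>
      have hp_ne : p ≠ t := hne p (List.mem_cons_self ..)
      have hpt : plt p t := by
        rcases plt_total hp_ne with h | h
        · exact h
        · exact absurd ((pairLt_iff _ _).mpr h) hlt
      refine List.pairwise_cons.mpr ⟨?_, ih hrest (fun q hq => hne q (List.mem_cons_of_mem _ hq))⟩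
      intro q hq
      rcases List.mem_cons.mp ((insortLex_perm rest t).mem_iff.mp hq) with h | h
      · subst h; exact hpt
      · exact hp _ h

lemma slice_map_toK {α β : Type} (f : α → β) (xs : List α) (K : Int) :
    PySem.List.slice (xs.map f) none (some K) = (PySem.List.slice xs none (some K)).map f := by
  simp [PySem.List.slice, PySem.List.clampIdx]

-- the two (definitionally equal) List-Int LT/DecidableLT instance pairs Lean elaborates for 'sorted'
lemma sorted_instances (xs : List Int) (key : Int → List Int) :
    @PySem.List.sorted Int (List Int) List.instLT (fun a b => a.decidableLT b) xs key false
    = @PySem.List.sorted Int (List Int) List.instLinearOrder.toLT LinearOrder.toDecidableLT xs key false := by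
  congr 1

-- the coupling invariant between A's state (d, l1) and B's sorted pair list ord
def StInv (d : PySem.Dict Int Int) (l1 : List Int) (ord : List (Int × Int)) : Prop :=
  ord = l1.map (fun y => (-(d.getD y 0), y))
  ∧ l1.Nodup
  ∧ (∀ y, y ∈ l1 ↔ 1 ≤ d.getD y 0)
  ∧ (∀ y, 0 ≤ d.getD y 0)
  ∧ List.Pairwise plt ord

lemma step_eq (arr : List Int) (K : Int) (d : PySem.Dict Int Int) (l1 : List Int)
    (ord : List (Int × Int)) (out : List (List Int)) (m : Int) (i : Int)
    (hInv : StInv d l1 ord) (h0 : i = 0 → l1 = []) :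
    (kTopStepA arr K (d, l1, out, m) i).1 = (kTopStepB arr K (d, ord, out) i).1
    ∧ StInv (kTopStepA arr K (d, l1, out, m) i).1 (kTopStepA arr K (d, l1, out, m) i).2.1
        (kTopStepB arr K (d, ord, out) i).2.1
    ∧ (kTopStepA arr K (d, l1, out, m) i).2.2.1 = (kTopStepB arr K (d, ord, out) i).2.2 := by
  obtain ⟨hord, hnd, hmem, hnn, hpw⟩ := hInv
  simp only [kTopStepA, kTopStepB]
  set x := PySem.List.pyGetD arr i 0
  set c0 := d.getD x 0 with hc0def
  have hc0nn : 0 ≤ c0 := hnn x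
  -- both sides perform the same dict update
  have hdictA : (if d.contains x then d.insert x (d.getD x 0 + 1) else d.insert x 1)
      = d.insert x (c0 + 1) := by
    by_cases hc : d.contains x
    · simp [hc, hc0def]
    · have hz : c0 = 0 := PySem.Dict.getD_of_not_contains (d := d) (d0 := 0) (by simpa using hc)
      rw [if_neg (by simpa using hc), hz]; norm_num
  rw [hdictA]
  set d' := d.insert x (c0 + 1)
  have hgx : d'.getD x 0 = c0 + 1 := PySem.Dict.getD_insert_self d x (c0 + 1) 0
  have hgy : ∀ y : Int, y ≠ x → d'.getD y 0 = d.getD y 0 := by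
    intro y hy; exact PySem.Dict.getD_insert_of_ne d (c0 + 1) 0 hy
  -- the value list after A's (remove; append) dance: x moved to the end
  set r : List Int := if 1 ≤ c0 then l1.erase x else l1 with hrdef
  have hxr : x ∉ r := by
    rw [hrdef]; split
    next hc => exact hnd.not_mem_erase
    next hc => exact fun hx => hc ((hmem x).mp hx)
  have hrnd : r.Nodup := by
    rw [hrdef]; split
    · exact hnd.erase x
    · exact hnd
  have hrmem : ∀ y : Int, y ≠ x → (y ∈ r ↔ y ∈ l1) := by
    intro y hy; rw [hrdef]; split
    · exact ⟨fun h => List.mem_of_mem_erase h, fun h => (List.Nodup.mem_erase_iff hnd).mpr ⟨hy, h⟩⟩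
    · exact Iff.rfl
  have harm : (if d'.getD x 0 > 1 then (PySem.List.remove? l1 x).getD l1 else l1) = r := by
    rw [hgx, hrdef]
    by_cases hc : 1 ≤ c0
    · rw [if_pos (by omega), if_pos hc,
        PySem.List.remove?_eq_some_erase l1 x ((hmem x).mpr hc)]
      rfl
    · rw [if_neg (by omega), if_neg hc]
  simp only [harm]
  have hifA : ∀ u : List Int, (if d'.getD x 0 > max m (d'.getD x 0) then u
      else if d'.getD x 0 == max m (d'.getD x 0) then u else u) = u := by
    intro u; split
    · rfl
    · split <;> rfl
  simp only [hifA]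
  have hmove : (if i == 0 then l1 ++ [x] else r ++ [x]) = r ++ [x] := by
    by_cases hi0 : (i == 0) = true
    · rw [if_pos hi0]
      have hnil : l1 = [] := h0 (by simpa using hi0)
      have hc : ¬ 1 ≤ c0 := fun hc => by simpa [hnil] using (hmem x).mpr hc
      rw [hrdef, if_neg hc, hnil]
    · rw [if_neg (by simpa using hi0)]
  rw [hmove]
  -- B's pair list after the bisect delete is r under the OLD key, hence under the NEW key
  have hpairinj : Function.Injective (fun y : Int => (-(d.getD y 0), y)) := by
    intro a b hab; exact congrArg Prod.snd hab
  have hpwS : List.Pairwise plt (if c0 ≠ 0 then popBisect ord (-c0, x) else ord) := by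
    by_cases hc : c0 ≠ 0
    · have hc1 : 1 ≤ c0 := by omega
      have hmemord : (-c0, x) ∈ ord := by
        rw [hord]; exact List.mem_map.mpr ⟨x, (hmem x).mpr hc1, by rw [hc0def]⟩
      rw [if_pos hc, popBisect_eq_erase ord _ hpw hmemord]
      exact hpw.sublist (List.erase_sublist ..)
    · rw [if_neg hc]; exact hpw
  have hord1 : (if c0 ≠ 0 then popBisect ord (-c0, x) else ord)
      = r.map (fun y => (-(d'.getD y 0), y)) := by
    have h1 : (if c0 ≠ 0 then popBisect ord (-c0, x) else ord)
        = r.map (fun y => (-(d.getD y 0), y)) := by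
      by_cases hc : c0 ≠ 0
      · have hc1 : 1 ≤ c0 := by omega
        have hmemord : (-c0, x) ∈ ord := by
          rw [hord]; exact List.mem_map.mpr ⟨x, (hmem x).mpr hc1, by rw [hc0def]⟩
        rw [if_pos hc, popBisect_eq_erase ord _ hpw hmemord, hord, hrdef, if_pos hc1, hc0def,
          ← List.map_erase hpairinj]
      · rw [if_neg hc, hord, hrdef, if_neg (by omega)]
    rw [h1]
    exact List.map_congr_left (fun y hy => by rw [hgy y (fun h => hxr (h ▸ hy))])
  rw [hord1] at hpwS ⊢
  set S := r.map (fun y : Int => (-(d'.getD y 0), y)) with hSdef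
  -- insort inserts x's new pair
  have ht : ((-c0 - 1, x) : Int × Int) = (-(d'.getD x 0), x) := by rw [hgx]; ring_nf
  have hneS : ∀ p ∈ S, p ≠ ((-c0 - 1, x) : Int × Int) := by
    intro p hp hpt
    rcases List.mem_map.mp hp with ⟨y, hy, rfl⟩
    have hyx : y = x := congrArg Prod.snd hpt
    exact hxr (hyx ▸ hy)
  have hpw2 : List.Pairwise plt (insortLex S (-c0 - 1, x)) := insortLex_pairwise S _ hpwS hneS
  have hpermT : (insortLex S (-c0 - 1, x)).Perm
      ((r ++ [x]).map (fun y => (-(d'.getD y 0), y))) := by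
    refine (insortLex_perm S _).trans ?_
    rw [List.map_append, List.map_singleton, ← ht]
    exact (List.perm_append_singleton _ _).symm
  have helts : ∀ p ∈ insortLex S (-c0 - 1, x), p = (-(d'.getD p.2 0), p.2) := by
    intro p hp
    rcases List.mem_cons.mp ((insortLex_perm S _).mem_iff.mp hp) with h | h
    · subst h; exact ht
    · rcases List.mem_map.mp h with ⟨y, _, rfl⟩; rfl
  have hsnd : ((insortLex S (-c0 - 1, x)).map (·.2)).Perm (r ++ [x]) := by
    have h := hpermT.map (·.2)
    rw [List.map_map] at h
    exact h.trans (List.Perm.of_eq (List.map_id'' (fun y => rfl) _))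
  have hpwkey : List.Pairwise (fun a b => (fun y : Int => [-(d'.getD y 0), y]) a
      < (fun y : Int => [-(d'.getD y 0), y]) b) ((insortLex S (-c0 - 1, x)).map (·.2)) := by
    rw [List.pairwise_map]
    refine hpw2.imp_of_mem ?_
    intro p q hp hq hpq
    have hp' := helts p hp
    have hq' := helts q hq
    have h1 : -(d'.getD p.2 0) = p.1 := (congrArg Prod.fst hp').symm
    have h2 : -(d'.getD q.2 0) = q.1 := (congrArg Prod.fst hq').symm
    simp only [h1, h2]
    exact (listlex_iff p.1 p.2 q.1 q.2).mpr hpq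
  have hsortedA := PySem.List.sorted_eq_of_perm_of_pairwise_lt (r ++ [x])
    ((insortLex S (-c0 - 1, x)).map (·.2)) (fun y : Int => [-(d'.getD y 0), y]) hsnd hpwkey
  rw [sorted_instances, hsortedA]
  set M := (insortLex S (-c0 - 1, x)).map (·.2) with hMdef
  have hback : insortLex S (-c0 - 1, x) = M.map (fun y => (-(d'.getD y 0), y)) := by
    rw [hMdef, List.map_map]
    exact ((List.map_congr_left (fun p hp => (helts p hp).symm)).trans (List.map_id _)).symm
  have hout : (PySem.List.slice (insortLex S (-c0 - 1, x)) none (some K)).map (·.2)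
      = PySem.List.slice M none (some K) := by
    conv_lhs => rw [hback]
    rw [slice_map_toK, List.map_map]
    exact List.map_id'' (fun y => rfl) _
  refine ⟨trivial, ⟨hback, ?_, ?_, ?_, hpw2⟩, ?_⟩
  · refine (hsnd.nodup_iff).mpr ?_
    simp [List.nodup_append, hrnd]
    exact fun a ha h => hxr (h ▸ ha)
  · intro y
    rw [hsnd.mem_iff]
    by_cases hyx : y = x
    · subst hyx
      simp [hgx]
      omega
    · rw [hgy y hyx]
      simp only [List.mem_append, List.mem_singleton, hrmem y hyx, hmem y]
      exact ⟨fun h => h.resolve_right hyx, Or.inl⟩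
  · intro y
    by_cases hyx : y = x
    · subst hyx; rw [hgx]; omega
    · rw [hgy y hyx]; exact hnn y
  · rw [hout]

lemma fold_inv (arr : List Int) (K : Int) (n : Nat) :
    ((PySem.List.pyRange 0 (n : Int) 1).foldl (kTopStepA arr K) (PySem.Dict.empty, [], [], 0)).1
      = ((PySem.List.pyRange 0 (n : Int) 1).foldl (kTopStepB arr K) (PySem.Dict.empty, [], [])).1
    ∧ StInv ((PySem.List.pyRange 0 (n : Int) 1).foldl (kTopStepA arr K) (PySem.Dict.empty, [], [], 0)).1
        ((PySem.List.pyRange 0 (n : Int) 1).foldl (kTopStepA arr K) (PySem.Dict.empty, [], [], 0)).2.1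
        ((PySem.List.pyRange 0 (n : Int) 1).foldl (kTopStepB arr K) (PySem.Dict.empty, [], [])).2.1
    ∧ ((PySem.List.pyRange 0 (n : Int) 1).foldl (kTopStepA arr K) (PySem.Dict.empty, [], [], 0)).2.2.1
      = ((PySem.List.pyRange 0 (n : Int) 1).foldl (kTopStepB arr K) (PySem.Dict.empty, [], [])).2.2
    ∧ (n = 0 → ((PySem.List.pyRange 0 (n : Int) 1).foldl (kTopStepA arr K) (PySem.Dict.empty, [], [], 0)).2.1 = []) := by
  induction n with
  | zero =>
    rw [Nat.cast_zero, PySem.List.pyRange_one_eq_nil (le_refl 0)]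
    refine ⟨rfl, ⟨rfl, List.nodup_nil, ?_, ?_, List.Pairwise.nil⟩, rfl, fun _ => rfl⟩
    · intro y; simp [PySem.Dict.getD_empty]
    · intro y; simp [PySem.Dict.getD_empty]
  | succ n ih =>
    obtain ⟨hd, hinv, hout, hnil⟩ := ih
    have hcast : ((n + 1 : Nat) : Int) = (n : Int) + 1 := by push_cast; ring
    rw [hcast, PySem.List.pyRange_one_succ_right (by positivity)]
    simp only [List.foldl_append, List.foldl_cons, List.foldl_nil]
    have h0 : (n : Int) = 0 →
        ((PySem.List.pyRange 0 (n : Int) 1).foldl (kTopStepA arr K) (PySem.Dict.empty, [], [], 0)).2.1 = [] :=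
      fun h => hnil (by exact_mod_cast h)
    have hstep := step_eq arr K _ _ _
      ((PySem.List.pyRange 0 (n : Int) 1).foldl (kTopStepA arr K) (PySem.Dict.empty, [], [], 0)).2.2.1
      ((PySem.List.pyRange 0 (n : Int) 1).foldl (kTopStepA arr K) (PySem.Dict.empty, [], [], 0)).2.2.2
      (n : Int) hinv h0
    have hBeq : ((PySem.List.pyRange 0 (n : Int) 1).foldl (kTopStepB arr K) (PySem.Dict.empty, [], []))
        = (((PySem.List.pyRange 0 (n : Int) 1).foldl (kTopStepA arr K) (PySem.Dict.empty, [], [], 0)).1,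
           ((PySem.List.pyRange 0 (n : Int) 1).foldl (kTopStepB arr K) (PySem.Dict.empty, [], [])).2.1,
           ((PySem.List.pyRange 0 (n : Int) 1).foldl (kTopStepA arr K) (PySem.Dict.empty, [], [], 0)).2.2.1) := by
      rw [hd, hout]
    rw [hBeq]
    exact ⟨hstep.1, hstep.2.1, hstep.2.2, fun h => absurd h (Nat.succ_ne_zero n)⟩

-- ===== VERDICT (by name: the statement is the Claim_ definition above) =====
theorem kTop_spec : Claim_equal_kTop := by
  intro arr N K _ _
  unfold Spec_kTop kTop kTop_alt
  by_cases hN : N ≤ 0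
  · rw [PySem.List.pyRange_one_eq_nil hN]; rfl
  · have hN' : N = (N.toNat : Int) := by omega
    rw [hN']
    exact (fold_inv arr K N.toNat).2.2.1
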